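-- pv_equiv track=rewrite | github.com/kimyubi/ps | 유전형질.py | solution
-- ===== SOURCE A (Python) =====
-- def solution(queries):
--     answer = []
--     def get_genes(generation, idx):
--         # 재귀 종료 조건
--         if generation == 1:
--             return "Rr"
--
--         # 부모의 형질을 알아낸다.
--         parent = get_genes(generation-1, idx // 4)
--
--         if parent == "RR":
--             return "RR"
--         elif parent == "rr":
--             return "rr"
--         else:
--             which_child = idx % 4
--             if which_child in (1, 2):
--                 return "Rr"
--             elif which_child == 0:
--                 return "RR"
--             elif which_child  == 3:
--                 return "rr"
--
--     for generation, idx in queries: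
--         answer.append(get_genes(generation, idx - 1))
--
--     return answer
-- ===== SOURCE B (Python) =====
-- def gene(generation, idx):
--     if generation < 1:
--         raise ValueError("generation must be at least 1")
--     n = idx - 1
--     e = generation - 2
--     while e >= 0:
--         d = (n // 4 ** e) % 4
--         if d == 0:
--             return "RR"
--         if d == 3:
--             return "rr"
--         e -= 1
--     return "Rr"
--
--
-- def solution(queries):
--     return [gene(generation, idx) for generation, idx in queries]
-- ===== Notes on version B (the rewrite author's own statement) =====
-- stated objective: alternative
-- what changed: Replaces the bottom-up parent recursion (recurse to generation 1, then propagate the decisive trait down) with a top-down iterative walk over the base-4 digits of idx-1, from the most significant digit (exponent generation-2) down to 0, returning early at the first digit 0 ('RR') or 3 ('rr') and 'Rr' if none is decisive; B validates generation >= 1 instead of recursing forever.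
import Mathlib
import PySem

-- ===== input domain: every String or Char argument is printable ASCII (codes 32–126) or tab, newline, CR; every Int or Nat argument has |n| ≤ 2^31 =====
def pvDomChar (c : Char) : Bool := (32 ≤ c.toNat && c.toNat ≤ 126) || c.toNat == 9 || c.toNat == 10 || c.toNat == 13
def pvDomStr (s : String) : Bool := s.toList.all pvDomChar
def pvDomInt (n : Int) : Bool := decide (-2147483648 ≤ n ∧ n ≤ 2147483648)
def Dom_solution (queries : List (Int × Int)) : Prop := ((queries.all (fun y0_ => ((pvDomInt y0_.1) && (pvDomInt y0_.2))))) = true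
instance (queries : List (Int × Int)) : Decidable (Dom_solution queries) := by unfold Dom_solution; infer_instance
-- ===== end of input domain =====

-- B replaces A's bottom-up parent recursion by a top-down scan of the base-4 digits of
-- idx-1 with early exit (objective: alternative decomposition, same cost).

-- ===== PORT A =====
-- A's inner recursion; fuel = generation.toNat (under Pre_, 1 ≤ generation, so the
-- fuel-0 branch is never reached: it only makes the recursion total in Lean).
def getGenes : Nat → Int → Int → String
  | 0, _, _ => "Rr"
  | fuel + 1, generation, idx =>
    if generation = 1 then "Rr"
    else
      let parent := getGenes fuel (generation - 1) (PySem.Int.floordiv idx 4)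
      if parent = "RR" then "RR"
      else if parent = "rr" then "rr"
      else
        let whichChild := PySem.Int.mod idx 4
        if whichChild = 1 ∨ whichChild = 2 then "Rr"
        else if whichChild = 0 then "RR"
        else "rr"  -- whichChild = 3 is the only remaining case: idx % 4 ∈ {0,1,2,3}

def solution (queries : List (Int × Int)) : List String :=
  queries.foldl (fun answer q => answer ++ [getGenes q.1.toNat q.1 (q.2 - 1)]) []

-- ===== PORT B =====
-- Source B's while-loop over the exponent e, counting down; Python's 4 ** e with e ≥ 0 is 4 ^ e.toNat.
def digitScan (n e : Int) : String :=
  if h : 0 ≤ e then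
    let d := PySem.Int.mod (PySem.Int.floordiv n ((4 : Int) ^ e.toNat)) 4
    if d = 0 then "RR"
    else if d = 3 then "rr"
    else digitScan n (e - 1)
  else "Rr"
termination_by (e + 1).toNat
decreasing_by omega

def gene (generation idx : Int) : String :=
  if generation < 1 then "Rr"  -- Python B raises ValueError here; Pre_ excludes these inputs
  else digitScan (idx - 1) (generation - 2)

def solution_alt (queries : List (Int × Int)) : List String :=
  queries.map (fun q => gene q.1 q.2)

-- ===== PRECONDITION & SPEC =====
-- Pre_ requires every generation to be at least 1: for generation ≤ 0 A's recursion
-- never reaches its base case (CPython raises RecursionError, no value is returned),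
-- and B raises ValueError there.
def Pre_solution (queries : List (Int × Int)) : Prop :=
  ∀ q ∈ queries, 1 ≤ q.1
instance (queries : List (Int × Int)) : Decidable (Pre_solution queries) := by
  unfold Pre_solution; infer_instance

def pvWitness_solution : (List (Int × Int)) := [(1, 1), (2, 3), (3, 10), (4, 26)]

def Spec_solution (queries : List (Int × Int)) (out : List String) : Prop := out = solution_alt queries
instance (queries : List (Int × Int)) (out : List String) : Decidable (Spec_solution queries out) := by unfold Spec_solution; infer_instance

-- ===== CLAIM (what is proved, stated in full; the proofs are below) =====
def Claim_equal_solution : Prop := ∀ (queries : List (Int × Int)), Dom_solution queries → Pre_solution queries → Spec_solution queries (solution queries)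

-- ===== LEMMAS AND PROOFS =====

-- Composing two floor divisions by positive divisors.
lemma floordiv_floordiv (a b c : Int) (hb : 0 < b) (hc : 0 < c) :
    PySem.Int.floordiv (PySem.Int.floordiv a b) c = PySem.Int.floordiv a (b * c) := by
  rw [PySem.Int.floordiv_eq_ediv_of_pos hb, PySem.Int.floordiv_eq_ediv_of_pos hc,
    PySem.Int.floordiv_eq_ediv_of_pos (by positivity)]
  exact Int.ediv_ediv_of_nonneg (le_of_lt hb)

-- One step of B's top-down scan equals A's "decide by parent, else by idx % 4" step.
lemma digitScan_step (n e : Int) (he : 0 ≤ e) :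
    digitScan n e =
      (let parent := digitScan (PySem.Int.floordiv n 4) (e - 1)
       if parent = "RR" then "RR"
       else if parent = "rr" then "rr"
       else
         let w := PySem.Int.mod n 4
         if w = 1 ∨ w = 2 then "Rr"
         else if w = 0 then "RR"
         else "rr") := by
  induction e, he using Int.le_induction with
  | base =>
      rw [digitScan]
      simp only [le_refl, dif_pos, Int.toNat_zero, pow_zero]
      rw [show PySem.Int.floordiv n 1 = n by simp [PySem.Int.floordiv]]
      rw [show digitScan (PySem.Int.floordiv n 4) (0 - 1) = "Rr" by rw [digitScan]; norm_num]
      have h0 : 0 ≤ PySem.Int.mod n 4 := PySem.Int.mod_nonneg n (by norm_num)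
      have h4 : PySem.Int.mod n 4 < 4 := PySem.Int.mod_lt n (by norm_num)
      set w := PySem.Int.mod n 4 with hw
      interval_cases w <;> simp <;> rw [digitScan] <;> norm_num
  | succ e he1 ih =>
      rw [digitScan]
      have hpos : (0:Int) ≤ e + 1 := by omega
      simp only [hpos, dif_pos]
      have hexp : ((4:Int) ^ (e+1).toNat) = 4 * 4 ^ e.toNat := by
        rw [show (e+1).toNat = e.toNat + 1 by omega, pow_succ]; ring
      have hd : PySem.Int.floordiv n ((4:Int) ^ (e+1).toNat)
          = PySem.Int.floordiv (PySem.Int.floordiv n 4) ((4:Int) ^ e.toNat) := by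
        rw [floordiv_floordiv _ _ _ (by norm_num) (by positivity), hexp]
      -- unfold the parent scan one step on the RHS
      conv_rhs => rw [show (e + 1 - 1 : Int) = e by ring, digitScan]
      simp only [he1, dif_pos, hd]
      set d := PySem.Int.mod (PySem.Int.floordiv (PySem.Int.floordiv n 4) ((4:Int) ^ e.toNat)) 4 with hdd
      by_cases h0 : d = 0
      · simp [h0]
      · by_cases h3 : d = 3
        · simp [h3]
        · simp only [h0, h3, if_false]
          rw [show (e + 1 - 1 : Int) = e by ring, ih]

-- A's recursion (with fuel = generation.toNat) computes B's top-down digit scan.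
lemma getGenes_eq_digitScan : ∀ (fuel : Nat) (g n : Int), 1 ≤ g → g.toNat = fuel →
    getGenes fuel g n = digitScan n (g - 2) := by
  intro fuel
  induction fuel with
  | zero => intro g n hg hf; omega
  | succ fuel ih =>
      intro g n hg hf
      rw [getGenes]
      by_cases h1 : g = 1
      · subst h1
        simp only [if_true]
        rw [show (1 - 2 : Int) = -1 by ring, digitScan]; norm_num
      · have hg2 : 2 ≤ g := by omega
        simp only [h1, if_false]
        rw [ih (g - 1) (PySem.Int.floordiv n 4) (by omega) (by omega)]
        rw [digitScan_step n (g - 2) (by omega)]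
        rw [show (g - 1 - 2 : Int) = g - 2 - 1 by ring]

-- ===== VERDICT (by name: the statement is the Claim_ definition above) =====
theorem solution_spec : Claim_equal_solution := by
  intro queries _ hpre
  unfold Spec_solution solution solution_alt
  rw [PySem.List.foldl_append_singleton_eq_map]
  simp only [List.nil_append]
  apply List.map_congr_left
  intro q hq
  have h1 := hpre q hq
  unfold gene
  rw [if_neg (by omega)]
  exact getGenes_eq_digitScan q.1.toNat q.1 (q.2 - 1) h1 rfl
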